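-- pv_equiv track=rewrite | github.com/mboard8070/generative-materials | scripts/prepare_dataset.py | infer_properties
-- ===== SOURCE A (Python) =====
-- def infer_properties(name: str, tags: list = None) -> dict:
--     """Infer material properties from name and tags."""
--     name_lower = name.lower()
--     tags_lower = [t.lower() for t in (tags or [])]
--     all_text = name_lower + " " + " ".join(tags_lower)
--
--     properties = []
--
--     # Roughness indicators
--     if any(w in all_text for w in ["polished", "glossy", "shiny", "mirror"]):
--         properties.append("polished")
--     elif any(w in all_text for w in ["rough", "raw", "coarse"]):
--         properties.append("rough")
--     elif any(w in all_text for w in ["matte", "flat"]):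
--         properties.append("matte")
--
--     # Age indicators
--     if any(w in all_text for w in ["old", "aged", "weathered", "worn", "ancient"]):
--         properties.append("weathered")
--     elif any(w in all_text for w in ["rusted", "rust", "corroded"]):
--         properties.append("rusted")
--     elif any(w in all_text for w in ["new", "clean", "pristine"]):
--         properties.append("clean")
--
--     # Material type hints
--     if any(w in all_text for w in ["metal", "steel", "iron", "copper", "brass", "aluminum"]):
--         properties.append("metallic")
--     if any(w in all_text for w in ["wood", "timber", "plank", "oak", "pine"]):
--         properties.append("wooden")
--     if any(w in all_text for w in ["stone", "rock", "granite", "marble"]):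
--         properties.append("stone")
--     if any(w in all_text for w in ["concrete", "cement"]):
--         properties.append("concrete")
--     if any(w in all_text for w in ["brick", "tile"]):
--         properties.append("brick")
--     if any(w in all_text for w in ["fabric", "cloth", "textile", "leather"]):
--         properties.append("fabric")
--
--     return properties
-- ===== SOURCE B (Python) =====
-- # One flat keyword->label map; compute the set of matched labels in a single
-- # pass, then resolve output via priority groups and an ordered label list.
-- _KEYWORD_LABEL = [
--     ("polished", "polished"), ("glossy", "polished"), ("shiny", "polished"), ("mirror", "polished"),
--     ("rough", "rough"), ("raw", "rough"), ("coarse", "rough"),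
--     ("matte", "matte"), ("flat", "matte"),
--     ("old", "weathered"), ("aged", "weathered"), ("weathered", "weathered"), ("worn", "weathered"), ("ancient", "weathered"),
--     ("rusted", "rusted"), ("rust", "rusted"), ("corroded", "rusted"),
--     ("new", "clean"), ("clean", "clean"), ("pristine", "clean"),
--     ("metal", "metallic"), ("steel", "metallic"), ("iron", "metallic"), ("copper", "metallic"), ("brass", "metallic"), ("aluminum", "metallic"),
--     ("wood", "wooden"), ("timber", "wooden"), ("plank", "wooden"), ("oak", "wooden"), ("pine", "wooden"),
--     ("stone", "stone"), ("rock", "stone"), ("granite", "stone"), ("marble", "stone"),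
--     ("concrete", "concrete"), ("cement", "concrete"),
--     ("brick", "brick"), ("tile", "brick"),
--     ("fabric", "fabric"), ("cloth", "fabric"), ("textile", "fabric"), ("leather", "fabric"),
-- ]
-- _PRIORITY_GROUPS = [("polished", "rough", "matte"), ("weathered", "rusted", "clean")]
-- _INDEPENDENT = ("metallic", "wooden", "stone", "concrete", "brick", "fabric")
--
--
-- def infer_properties(name: str, tags: list = None) -> list:
--     """Infer material properties from name and tags."""
--     text = name.lower() + " " + " ".join(t.lower() for t in (tags or []))
--     matched = {label for kw, label in _KEYWORD_LABEL if kw in text}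
--     out = []
--     for group in _PRIORITY_GROUPS:
--         out.extend([l for l in group if l in matched][:1])
--     out.extend(l for l in _INDEPENDENT if l in matched)
--     return out
-- ===== Notes on version B (the rewrite author's own statement) =====
-- stated objective: alternative
-- what changed: Replaces the 12-branch if/elif chain of per-group substring tests with a two-phase algorithm: one pass over a flat keyword-to-label map collects the set of matched labels, then the output is assembled from that set via priority groups (first matched label wins) and an ordered independent-label list.
import Mathlib
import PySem

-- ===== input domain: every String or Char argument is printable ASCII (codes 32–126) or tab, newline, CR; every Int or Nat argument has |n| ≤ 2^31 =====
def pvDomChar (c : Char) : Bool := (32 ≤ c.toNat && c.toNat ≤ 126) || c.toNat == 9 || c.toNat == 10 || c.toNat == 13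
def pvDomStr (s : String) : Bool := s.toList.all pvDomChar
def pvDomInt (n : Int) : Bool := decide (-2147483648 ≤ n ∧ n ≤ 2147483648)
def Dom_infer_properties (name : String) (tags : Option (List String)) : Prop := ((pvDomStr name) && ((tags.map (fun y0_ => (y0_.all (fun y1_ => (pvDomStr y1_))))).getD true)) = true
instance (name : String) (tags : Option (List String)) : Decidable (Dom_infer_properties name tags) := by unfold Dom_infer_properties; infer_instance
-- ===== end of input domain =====

-- B replaces A's flat 12-branch if/elif chain by a two-phase algorithm: one pass
-- over a flat keyword→label map collects the SET of matched labels, then the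
-- output is assembled from priority groups and an ordered label list; objective: alternative (same cost).

-- ===== PORT A =====
def infer_properties (name : String) (tags : Option (List String)) : List String :=
  let name_lower := PySem.Str.lower name
  let tags_lower := (tags.getD []).map (fun t => PySem.Str.lower t)
  let all_text := name_lower ++ " " ++ PySem.Str.join " " tags_lower
  let properties : List String := []
  -- Roughness indicators
  let properties :=
    if ["polished", "glossy", "shiny", "mirror"].any (fun w => PySem.Str.isIn w all_text) then properties ++ ["polished"]
    else if ["rough", "raw", "coarse"].any (fun w => PySem.Str.isIn w all_text) then properties ++ ["rough"]
    else if ["matte", "flat"].any (fun w => PySem.Str.isIn w all_text) then properties ++ ["matte"]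
    else properties
  -- Age indicators
  let properties :=
    if ["old", "aged", "weathered", "worn", "ancient"].any (fun w => PySem.Str.isIn w all_text) then properties ++ ["weathered"]
    else if ["rusted", "rust", "corroded"].any (fun w => PySem.Str.isIn w all_text) then properties ++ ["rusted"]
    else if ["new", "clean", "pristine"].any (fun w => PySem.Str.isIn w all_text) then properties ++ ["clean"]
    else properties
  -- Material type hints
  let properties :=
    if ["metal", "steel", "iron", "copper", "brass", "aluminum"].any (fun w => PySem.Str.isIn w all_text) then properties ++ ["metallic"] else properties
  let properties :=
    if ["wood", "timber", "plank", "oak", "pine"].any (fun w => PySem.Str.isIn w all_text) then properties ++ ["wooden"] else properties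
  let properties :=
    if ["stone", "rock", "granite", "marble"].any (fun w => PySem.Str.isIn w all_text) then properties ++ ["stone"] else properties
  let properties :=
    if ["concrete", "cement"].any (fun w => PySem.Str.isIn w all_text) then properties ++ ["concrete"] else properties
  let properties :=
    if ["brick", "tile"].any (fun w => PySem.Str.isIn w all_text) then properties ++ ["brick"] else properties
  let properties :=
    if ["fabric", "cloth", "textile", "leather"].any (fun w => PySem.Str.isIn w all_text) then properties ++ ["fabric"] else properties
  properties

-- ===== PORT B =====
-- flat keyword→label map (one pass over it collects the matched labels)
def pvKeywordLabel : List (String × String) :=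
  [("polished", "polished"), ("glossy", "polished"), ("shiny", "polished"), ("mirror", "polished"),
   ("rough", "rough"), ("raw", "rough"), ("coarse", "rough"),
   ("matte", "matte"), ("flat", "matte"),
   ("old", "weathered"), ("aged", "weathered"), ("weathered", "weathered"), ("worn", "weathered"), ("ancient", "weathered"),
   ("rusted", "rusted"), ("rust", "rusted"), ("corroded", "rusted"),
   ("new", "clean"), ("clean", "clean"), ("pristine", "clean"),
   ("metal", "metallic"), ("steel", "metallic"), ("iron", "metallic"), ("copper", "metallic"), ("brass", "metallic"), ("aluminum", "metallic"),
   ("wood", "wooden"), ("timber", "wooden"), ("plank", "wooden"), ("oak", "wooden"), ("pine", "wooden"),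
   ("stone", "stone"), ("rock", "stone"), ("granite", "stone"), ("marble", "stone"),
   ("concrete", "concrete"), ("cement", "concrete"),
   ("brick", "brick"), ("tile", "brick"),
   ("fabric", "fabric"), ("cloth", "fabric"), ("textile", "fabric"), ("leather", "fabric")]

def pvPriorityGroups : List (List String) :=
  [["polished", "rough", "matte"], ["weathered", "rusted", "clean"]]

def pvIndependentLabels : List String :=
  ["metallic", "wooden", "stone", "concrete", "brick", "fabric"]

def infer_properties_alt (name : String) (tags : Option (List String)) : List String :=
  let text := PySem.Str.lower name ++ " " ++
    PySem.Str.join " " ((tags.getD []).map (fun t => PySem.Str.lower t))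
  -- matched = {label for kw, label in _KEYWORD_LABEL if kw in text}
  let matched : PySem.Set String :=
    PySem.Set.ofList ((pvKeywordLabel.filter (fun p => PySem.Str.isIn p.1 text)).map Prod.snd)
  -- out.extend([l for l in group if l in matched][:1]) for each priority group
  (pvPriorityGroups.flatMap (fun g => (g.filter (fun l => PySem.Set.contains matched l)).take 1)) ++
    -- out.extend(l for l in _INDEPENDENT if l in matched)
    pvIndependentLabels.filter (fun l => PySem.Set.contains matched l)

-- ===== PRECONDITION & SPEC =====
def Spec_infer_properties (name : String) (tags : Option (List String)) (out : List String) : Prop := out = infer_properties_alt name tags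
instance (name : String) (tags : Option (List String)) (out : List String) : Decidable (Spec_infer_properties name tags out) := by unfold Spec_infer_properties; infer_instance

-- ===== CLAIM (what is proved, stated in full; the proofs are below) =====
def Claim_equal_infer_properties : Prop := ∀ (name : String) (tags : Option (List String)), Dom_infer_properties name tags → Spec_infer_properties name tags (infer_properties name tags)

-- ===== LEMMAS AND PROOFS =====

-- A as a function of its twelve keyword-group tests (proof-only helper)
def pvA (c1 c2 c3 c4 c5 c6 c7 c8 c9 c10 c11 c12 : Bool) : List String :=
  let properties : List String := []
  let properties := if c1 then properties ++ ["polished"] else if c2 then properties ++ ["rough"] else if c3 then properties ++ ["matte"] else properties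
  let properties := if c4 then properties ++ ["weathered"] else if c5 then properties ++ ["rusted"] else if c6 then properties ++ ["clean"] else properties
  let properties := if c7 then properties ++ ["metallic"] else properties
  let properties := if c8 then properties ++ ["wooden"] else properties
  let properties := if c9 then properties ++ ["stone"] else properties
  let properties := if c10 then properties ++ ["concrete"] else properties
  let properties := if c11 then properties ++ ["brick"] else properties
  let properties := if c12 then properties ++ ["fabric"] else properties
  properties

theorem pv_hA (name : String) (tags : Option (List String)) :
    infer_properties name tags =
      (let t := PySem.Str.lower name ++ " " ++ PySem.Str.join " " ((tags.getD []).map (fun t => PySem.Str.lower t));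
       pvA (["polished", "glossy", "shiny", "mirror"].any (fun w => PySem.Str.isIn w t))
           (["rough", "raw", "coarse"].any (fun w => PySem.Str.isIn w t))
           (["matte", "flat"].any (fun w => PySem.Str.isIn w t))
           (["old", "aged", "weathered", "worn", "ancient"].any (fun w => PySem.Str.isIn w t))
           (["rusted", "rust", "corroded"].any (fun w => PySem.Str.isIn w t))
           (["new", "clean", "pristine"].any (fun w => PySem.Str.isIn w t))
           (["metal", "steel", "iron", "copper", "brass", "aluminum"].any (fun w => PySem.Str.isIn w t))
           (["wood", "timber", "plank", "oak", "pine"].any (fun w => PySem.Str.isIn w t))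
           (["stone", "rock", "granite", "marble"].any (fun w => PySem.Str.isIn w t))
           (["concrete", "cement"].any (fun w => PySem.Str.isIn w t))
           (["brick", "tile"].any (fun w => PySem.Str.isIn w t))
           (["fabric", "cloth", "textile", "leather"].any (fun w => PySem.Str.isIn w t))) := rfl

-- membership of a label in the matched-label set = an any() over the flat map
theorem pv_contains_matched (l : List (String × String)) (t lab : String) :
    PySem.Set.contains
      (PySem.Set.ofList ((l.filter (fun p => PySem.Str.isIn p.1 t)).map Prod.snd)) lab
    = l.any (fun p => p.2 == lab && PySem.Str.isIn p.1 t) := by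
  have h : (PySem.Set.contains
      (PySem.Set.ofList ((l.filter (fun p => PySem.Str.isIn p.1 t)).map Prod.snd)) lab) = true ↔
      (l.any (fun p => p.2 == lab && PySem.Str.isIn p.1 t)) = true := by
    simp [PySem.Set.contains, PySem.Set.mem_ofList, List.any_eq_true, List.mem_filter]
  exact Bool.eq_iff_iff.mpr h

-- each label's flat-map test equals the corresponding keyword-group test
theorem pv_b1 (t : String) : pvKeywordLabel.any (fun p => p.2 == "polished" && PySem.Str.isIn p.1 t)
    = (["polished", "glossy", "shiny", "mirror"].any (fun w => PySem.Str.isIn w t)) := by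
  simp [pvKeywordLabel]

theorem pv_b2 (t : String) : pvKeywordLabel.any (fun p => p.2 == "rough" && PySem.Str.isIn p.1 t)
    = (["rough", "raw", "coarse"].any (fun w => PySem.Str.isIn w t)) := by
  simp [pvKeywordLabel]

theorem pv_b3 (t : String) : pvKeywordLabel.any (fun p => p.2 == "matte" && PySem.Str.isIn p.1 t)
    = (["matte", "flat"].any (fun w => PySem.Str.isIn w t)) := by
  simp [pvKeywordLabel]

theorem pv_b4 (t : String) : pvKeywordLabel.any (fun p => p.2 == "weathered" && PySem.Str.isIn p.1 t)
    = (["old", "aged", "weathered", "worn", "ancient"].any (fun w => PySem.Str.isIn w t)) := by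
  simp [pvKeywordLabel]

theorem pv_b5 (t : String) : pvKeywordLabel.any (fun p => p.2 == "rusted" && PySem.Str.isIn p.1 t)
    = (["rusted", "rust", "corroded"].any (fun w => PySem.Str.isIn w t)) := by
  simp [pvKeywordLabel]

theorem pv_b6 (t : String) : pvKeywordLabel.any (fun p => p.2 == "clean" && PySem.Str.isIn p.1 t)
    = (["new", "clean", "pristine"].any (fun w => PySem.Str.isIn w t)) := by
  simp [pvKeywordLabel]

theorem pv_b7 (t : String) : pvKeywordLabel.any (fun p => p.2 == "metallic" && PySem.Str.isIn p.1 t)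
    = (["metal", "steel", "iron", "copper", "brass", "aluminum"].any (fun w => PySem.Str.isIn w t)) := by
  simp [pvKeywordLabel]

theorem pv_b8 (t : String) : pvKeywordLabel.any (fun p => p.2 == "wooden" && PySem.Str.isIn p.1 t)
    = (["wood", "timber", "plank", "oak", "pine"].any (fun w => PySem.Str.isIn w t)) := by
  simp [pvKeywordLabel]

theorem pv_b9 (t : String) : pvKeywordLabel.any (fun p => p.2 == "stone" && PySem.Str.isIn p.1 t)
    = (["stone", "rock", "granite", "marble"].any (fun w => PySem.Str.isIn w t)) := by
  simp [pvKeywordLabel]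

theorem pv_b10 (t : String) : pvKeywordLabel.any (fun p => p.2 == "concrete" && PySem.Str.isIn p.1 t)
    = (["concrete", "cement"].any (fun w => PySem.Str.isIn w t)) := by
  simp [pvKeywordLabel]

theorem pv_b11 (t : String) : pvKeywordLabel.any (fun p => p.2 == "brick" && PySem.Str.isIn p.1 t)
    = (["brick", "tile"].any (fun w => PySem.Str.isIn w t)) := by
  simp [pvKeywordLabel]

theorem pv_b12 (t : String) : pvKeywordLabel.any (fun p => p.2 == "fabric" && PySem.Str.isIn p.1 t)
    = (["fabric", "cloth", "textile", "leather"].any (fun w => PySem.Str.isIn w t)) := by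
  simp [pvKeywordLabel]

-- ===== VERDICT (by name: the statement is the Claim_ definition above) =====
set_option maxHeartbeats 2000000 in
theorem infer_properties_spec : Claim_equal_infer_properties := by
  intro name tags _
  show infer_properties name tags = infer_properties_alt name tags
  rw [pv_hA]
  unfold infer_properties_alt
  dsimp only
  generalize (PySem.Str.lower name ++ " " ++
      PySem.Str.join " " (List.map (fun t => PySem.Str.lower t) (tags.getD []))) = t
  simp only [pvPriorityGroups, pvIndependentLabels, List.flatMap_cons, List.flatMap_nil,
    List.filter_cons, List.filter_nil, List.append_nil,
    pv_contains_matched, pv_b1, pv_b2, pv_b3, pv_b4, pv_b5, pv_b6, pv_b7, pv_b8, pv_b9,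
    pv_b10, pv_b11, pv_b12]
  generalize (["polished", "glossy", "shiny", "mirror"].any (fun w => PySem.Str.isIn w t)) = c1
  generalize (["rough", "raw", "coarse"].any (fun w => PySem.Str.isIn w t)) = c2
  generalize (["matte", "flat"].any (fun w => PySem.Str.isIn w t)) = c3
  generalize (["old", "aged", "weathered", "worn", "ancient"].any (fun w => PySem.Str.isIn w t)) = c4
  generalize (["rusted", "rust", "corroded"].any (fun w => PySem.Str.isIn w t)) = c5
  generalize (["new", "clean", "pristine"].any (fun w => PySem.Str.isIn w t)) = c6
  generalize (["metal", "steel", "iron", "copper", "brass", "aluminum"].any (fun w => PySem.Str.isIn w t)) = c7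
  generalize (["wood", "timber", "plank", "oak", "pine"].any (fun w => PySem.Str.isIn w t)) = c8
  generalize (["stone", "rock", "granite", "marble"].any (fun w => PySem.Str.isIn w t)) = c9
  generalize (["concrete", "cement"].any (fun w => PySem.Str.isIn w t)) = c10
  generalize (["brick", "tile"].any (fun w => PySem.Str.isIn w t)) = c11
  generalize (["fabric", "cloth", "textile", "leather"].any (fun w => PySem.Str.isIn w t)) = c12
  revert c1 c2 c3 c4 c5 c6 c7 c8 c9 c10 c11 c12
  decide
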